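-- pv_equiv track=rewrite | github.com/rmakarenko/TheRevenant | walkers.py | white_walkers
-- ===== SOURCE A (Python) =====
-- def white_walkers(village):
--
--     positions_with_ten_sum = []
--     first_digit = - 2
--     first_digit_position = 0
--     clean_village = []  #  here we ll store the input string without letters
--
--     if len(village) == 0:
--         return False
--
--     for i in range(len(village)):
--         if village[i] == '0' or village[i] == '1' or village[i] == '2' or village[i] == '3' or village[i] == '4' or village[i] == '5' or village[i] == '6' or village[i] == '7' or village[i] == '8' or village[i] == '9':
--             clean_village.append(int(village[i]))  # after this cycle we have only digits and equal signs
--         elif village[i] == '=':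
--             clean_village.append(- 1)
--
--     for i in range(len(clean_village)) :
--         if clean_village[i] == - 1:
--             continue
--         elif first_digit == - 2:  # finding the first time first digit
--             first_digit = clean_village[i]
--             first_digit_position = i
--         elif first_digit + clean_village[i] == 10:
--             current_positions = [first_digit_position, i]
--             positions_with_ten_sum.append(current_positions)
--             first_digit = clean_village[i]
--             first_digit_position = i
--         else:  # this case occurs when sum != 10
--             first_digit = clean_village[i]
--             first_digit_position = i
--
--     if len(positions_with_ten_sum) == 0:
--         return False
--
--     for i in range(len(positions_with_ten_sum)):
--         walkers_count = 0
--         for j in range(positions_with_ten_sum[i][0] + 1, positions_with_ten_sum[i][1]):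
--             if clean_village[j] == - 1:
--                 walkers_count = walkers_count + 1
--         if walkers_count != 3:
--             return False
--
--     return True
-- ===== SOURCE B (Python) =====
-- def white_walkers(village):
--     prev = None
--     eq = 0
--     found = False
--     for ch in village:
--         if ch == '=':
--             eq += 1
--         elif '0' <= ch <= '9':
--             d = ord(ch) - 48
--             if prev is not None and prev + d == 10:
--                 if eq != 3:
--                     return False
--                 found = True
--             prev = d
--             eq = 0
--     return found
-- ===== Notes on version B (the rewrite author's own statement) =====
-- stated objective: simpler
-- what changed: Replaces A's three passes (build a filtered digit/equals-sign list, collect positions of adjacent ten-sum digit pairs, re-scan between each pair counting separators) by one left-to-right pass keeping only the previous digit, the separator count since it, and a found flag, with an early False on the first bad pair.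
import Mathlib
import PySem

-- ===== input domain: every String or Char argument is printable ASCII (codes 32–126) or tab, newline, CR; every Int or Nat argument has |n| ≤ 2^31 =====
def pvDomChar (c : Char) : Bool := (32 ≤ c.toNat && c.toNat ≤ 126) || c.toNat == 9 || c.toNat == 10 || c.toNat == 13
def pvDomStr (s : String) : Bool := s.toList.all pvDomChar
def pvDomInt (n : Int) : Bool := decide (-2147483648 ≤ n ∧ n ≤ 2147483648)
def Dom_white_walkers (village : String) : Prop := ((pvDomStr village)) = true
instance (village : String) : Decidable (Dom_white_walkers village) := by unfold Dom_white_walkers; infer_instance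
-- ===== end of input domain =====

-- B replaces A's three passes (filtered list, pair positions, re-count between pairs) by one
-- left-to-right pass keeping only the previous digit, the separator count since it and a found
-- flag; objective: simpler (and measured faster by a constant factor).

-- ===== PORT A =====
-- literal port of A: build clean_village (digits as their value, '=' as -1, others dropped),
-- collect position pairs of adjacent digits summing to 10, then re-count separators between pairs.
-- int(village[i]) on a digit char is ported exactly as toNat - 48; the indices produced by the
-- range loops are always in bounds, so getD is exact for clean_village[i]; the loop with an
-- early `return False` over positions_with_ten_sum is `.all`.
def white_walkers (village : String) : Bool :=
  let vl := village.toList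
  if vl.length = 0 then false
  else
    let clean := vl.foldl (fun acc c =>
      if c == '0' || c == '1' || c == '2' || c == '3' || c == '4' || c == '5' ||
         c == '6' || c == '7' || c == '8' || c == '9' then
        acc ++ [((c.toNat : Int) - 48)]
      else if c == '=' then acc ++ [(-1 : Int)] else acc) []
    let st := (List.range clean.length).foldl
      (fun (s : List (Nat × Nat) × Int × Nat) i =>
        let x := clean.getD i 0
        if x = -1 then s
        else if s.2.1 = -2 then (s.1, x, i)
        else if s.2.1 + x = 10 then (s.1 ++ [(s.2.2, i)], x, i)
        else (s.1, x, i)) ([], (-2 : Int), 0)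
    let pairs := st.1
    if pairs.length = 0 then false
    else pairs.all (fun pq =>
      ((List.range' (pq.1 + 1) (pq.2 - (pq.1 + 1))).foldl
        (fun w j => if clean.getD j 0 = -1 then w + 1 else w) 0) == 3)

-- ===== PORT B =====
-- single pass over the characters: previous digit, separator count since it, found flag
def wwGo : List Char → Option Int → Nat → Bool → Bool
  | [], _, _, found => found
  | c :: t, prev, eq, found =>
    if c == '=' then wwGo t prev (eq + 1) found
    else if '0' ≤ c ∧ c ≤ '9' then
      let d : Int := (c.toNat : Int) - 48
      match prev with
      | some p =>
        if p + d = 10 then (if eq ≠ 3 then false else wwGo t (some d) 0 true)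
        else wwGo t (some d) 0 found
      | none => wwGo t (some d) 0 found
    else wwGo t prev eq found

def white_walkers_alt (village : String) : Bool :=
  wwGo village.toList none 0 false

-- ===== PRECONDITION & SPEC =====
def Spec_white_walkers (village : String) (out : Bool) : Prop := out = white_walkers_alt village
instance (village : String) (out : Bool) : Decidable (Spec_white_walkers village out) := by unfold Spec_white_walkers; infer_instance

-- ===== CLAIM (what is proved, stated in full; the proofs are below) =====
def Claim_equal_white_walkers : Prop := ∀ (village : String), Dom_white_walkers village → Spec_white_walkers village (white_walkers village)

-- ===== LEMMAS AND PROOFS =====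

-- proof-side view of A's first loop (clean_village) as a structural recursion
def cleanOf : List Char → List Int
  | [] => []
  | c :: t =>
    if c == '0' || c == '1' || c == '2' || c == '3' || c == '4' || c == '5' ||
       c == '6' || c == '7' || c == '8' || c == '9' then
      ((c.toNat : Int) - 48) :: cleanOf t
    else if c == '=' then (-1 : Int) :: cleanOf t else cleanOf t

-- proof-side view of A's second loop as a recursion over the suffix of clean, carrying the position
def pairsRec : Nat → Option (Int × Nat) → List Int → List (Nat × Nat)
  | _, _, [] => []
  | i, st, x :: t =>
    if x = -1 then pairsRec (i + 1) st t
    else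
      match st with
      | none => pairsRec (i + 1) (some (x, i)) t
      | some (f, p) =>
        if f + x = 10 then (p, i) :: pairsRec (i + 1) (some (x, i)) t
        else pairsRec (i + 1) (some (x, i)) t

-- B's pass, replayed on clean_village values (-1 for '=', the digit value otherwise)
def wwGo' : List Int → Option Int → Nat → Bool → Bool
  | [], _, _, found => found
  | x :: t, prev, eq, found =>
    if x = -1 then wwGo' t prev (eq + 1) found
    else
      match prev with
      | some p =>
        if p + x = 10 then (if eq ≠ 3 then false else wwGo' t (some x) 0 true)
        else wwGo' t (some x) 0 found
      | none => wwGo' t (some x) 0 found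

def okP (pq : Nat × Nat) : Bool := (pq.2 - pq.1 - 1) == 3

lemma digit_cond (c : Char) :
    ((c == '0' || c == '1' || c == '2' || c == '3' || c == '4' || c == '5' ||
      c == '6' || c == '7' || c == '8' || c == '9') = true) ↔ ('0' ≤ c ∧ c ≤ '9') := by
  simp only [Bool.or_eq_true, beq_iff_eq, Char.le_def]
  constructor
  · rintro (((((((((rfl|rfl)|rfl)|rfl)|rfl)|rfl)|rfl)|rfl)|rfl)|rfl) <;> decide
  · rintro ⟨h1, h2⟩
    have h1' : 48 ≤ c.toNat := by exact_mod_cast UInt32.le_iff_toNat_le.mp h1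
    have h2' : c.toNat ≤ 57 := by exact_mod_cast UInt32.le_iff_toNat_le.mp h2
    have hc : c = Char.ofNat c.toNat := (Char.ofNat_toNat c).symm
    rw [hc]
    generalize c.toNat = n at h1' h2' ⊢
    interval_cases n <;> decide

lemma char48 {c : Char} (h : '0' ≤ c ∧ c ≤ '9') : 48 ≤ c.toNat ∧ c.toNat ≤ 57 := by
  obtain ⟨h1, h2⟩ := h
  exact ⟨by exact_mod_cast UInt32.le_iff_toNat_le.mp h1, by exact_mod_cast UInt32.le_iff_toNat_le.mp h2⟩

lemma clean_eq_cleanOf (l : List Char) (acc : List Int) :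
    l.foldl (fun acc c =>
      if c == '0' || c == '1' || c == '2' || c == '3' || c == '4' || c == '5' ||
         c == '6' || c == '7' || c == '8' || c == '9' then
        acc ++ [((c.toNat : Int) - 48)]
      else if c == '=' then acc ++ [(-1 : Int)] else acc) acc = acc ++ cleanOf l := by
  induction l generalizing acc with
  | nil => simp [cleanOf]
  | cons c t ih =>
    simp only [List.foldl_cons, cleanOf]
    by_cases h : (c == '0' || c == '1' || c == '2' || c == '3' || c == '4' || c == '5' ||
         c == '6' || c == '7' || c == '8' || c == '9') = true
    · rw [if_pos h, if_pos h, ih]; simp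
    · rw [if_neg h, if_neg h]
      by_cases h2 : (c == '=') = true
      · rw [if_pos h2, if_pos h2, ih]; simp
      · rw [if_neg h2, if_neg h2, ih]

lemma mem_cleanOf {x : Int} {l : List Char} (h : x ∈ cleanOf l) : x = -1 ∨ 0 ≤ x := by
  induction l with
  | nil => simp [cleanOf] at h
  | cons c t ih =>
    unfold cleanOf at h
    split_ifs at h with h1 h2
    · rcases List.mem_cons.mp h with rfl | hm
      · right
        have := (char48 ((digit_cond c).mp h1)).1
        omega
      · exact ih hm
    · rcases List.mem_cons.mp h with rfl | hm
      · exact Or.inl rfl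
      · exact ih hm
    · exact ih h

lemma count_all_neg (clean : List Int) :
    ∀ (n a : Nat) (w : Nat), (∀ j, a ≤ j → j < a + n → clean.getD j 0 = -1) →
      (List.range' a n).foldl (fun w j => if clean.getD j 0 = -1 then w + 1 else w) w = w + n := by
  intro n
  induction n with
  | zero => intro a w _; simp
  | succ m ih =>
    intro a w h
    rw [List.range'_succ, List.foldl_cons, if_pos (h a (le_refl a) (by omega))]
    rw [ih (a+1) (w+1) (fun j hj1 hj2 => h j (by omega) (by omega))]
    omega

lemma pairsRec_cons_neg (i : Nat) (st : Option (Int × Nat)) (x : Int) (t : List Int)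
    (h : x = -1) : pairsRec i st (x :: t) = pairsRec (i + 1) st t := by
  conv_lhs => unfold pairsRec
  rw [if_pos h]

lemma pairsRec_cons_none (i : Nat) (x : Int) (t : List Int) (h : ¬ x = -1) :
    pairsRec i none (x :: t) = pairsRec (i + 1) (some (x, i)) t := by
  conv_lhs => unfold pairsRec
  rw [if_neg h]

lemma pairsRec_cons_some (i : Nat) (f : Int) (p : Nat) (x : Int) (t : List Int) (h : ¬ x = -1) :
    pairsRec i (some (f, p)) (x :: t) =
      if f + x = 10 then (p, i) :: pairsRec (i + 1) (some (x, i)) t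
      else pairsRec (i + 1) (some (x, i)) t := by
  conv_lhs => unfold pairsRec
  rw [if_neg h]

lemma wwGo'_cons_neg (t : List Int) (prev : Option Int) (eq : Nat) (found : Bool)
    (x : Int) (h : x = -1) : wwGo' (x :: t) prev eq found = wwGo' t prev (eq + 1) found := by
  conv_lhs => unfold wwGo'
  rw [if_pos h]

lemma wwGo'_cons_none (t : List Int) (eq : Nat) (found : Bool) (x : Int) (h : ¬ x = -1) :
    wwGo' (x :: t) none eq found = wwGo' t (some x) 0 found := by
  conv_lhs => unfold wwGo'
  rw [if_neg h]

lemma wwGo'_cons_some (t : List Int) (p : Int) (eq : Nat) (found : Bool) (x : Int) (h : ¬ x = -1) :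
    wwGo' (x :: t) (some p) eq found =
      if p + x = 10 then (if eq ≠ 3 then false else wwGo' t (some x) 0 true)
      else wwGo' t (some x) 0 found := by
  conv_lhs => unfold wwGo'
  rw [if_neg h]

lemma drop_cons_facts {clean : List Int} {k : Nat} {x : Int} {t : List Int}
    (h : clean.drop k = x :: t) :
    k < clean.length ∧ clean.getD k 0 = x ∧ clean.drop (k+1) = t := by
  have hk : k < clean.length := by
    by_contra hk
    rw [List.drop_eq_nil_of_le (by omega)] at h
    simp at h
  refine ⟨hk, ?_, ?_⟩
  · have h0 : clean[k]? = some x := by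
      have h2 := congrArg (fun l : List Int => l[0]?) h
      simpa using h2
    rw [List.getD_eq_getElem?_getD, h0]
    rfl
  · have : clean.drop (k+1) = (clean.drop k).drop 1 := by rw [List.drop_drop]
    rw [this, h, List.drop_one, List.tail_cons]

lemma wwGo_eq_wwGo' (l : List Char) (prev : Option Int) (eq : Nat) (found : Bool) :
    wwGo l prev eq found = wwGo' (cleanOf l) prev eq found := by
  induction l generalizing prev eq found with
  | nil => rfl
  | cons c t ih =>
    by_cases hd : ('0' ≤ c ∧ c ≤ '9')
    · have hne : (c == '=') = false := by
        rcases char48 hd with ⟨_, h2⟩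
        have : c ≠ '=' := by
          intro hc; subst hc; simp at h2
        simp [this]
      have hx : ((c.toNat : Int) - 48) ≠ -1 := by
        have := (char48 hd).1; omega
      simp only [wwGo, cleanOf, hne, Bool.false_eq_true, if_false,
        if_pos hd, if_pos ((digit_cond c).mpr hd), wwGo', if_neg hx]
      cases prev with
      | none => exact ih _ _ _
      | some p =>
        dsimp only
        by_cases hs : p + ((c.toNat : Int) - 48) = 10
        · rw [if_pos hs, if_pos hs]
          by_cases he : eq ≠ 3
          · rw [if_pos he, if_pos he]
          · rw [if_neg he, if_neg he]; exact ih _ _ _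
        · rw [if_neg hs, if_neg hs]; exact ih _ _ _
    · have hd' : ¬ ((c == '0' || c == '1' || c == '2' || c == '3' || c == '4' || c == '5' ||
         c == '6' || c == '7' || c == '8' || c == '9') = true) := fun h => hd ((digit_cond c).mp h)
      by_cases he : c = '='
      · subst he
        simp only [wwGo, cleanOf, if_neg hd']
        norm_num
        exact ih _ _ _
      · have he' : (c == '=') = false := by simp [he]
        simp only [wwGo, cleanOf, he', Bool.false_eq_true, if_false, if_neg hd, if_neg hd']
        exact ih _ _ _

lemma fold_range_pairs (clean : List Int) (hcl : ∀ x ∈ clean, x = -1 ∨ 0 ≤ x) :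
    ∀ (l : List Int) (k : Nat) (acc : List (Nat × Nat)) (f : Int) (p : Nat),
      clean.drop k = l → (f = -2 ∨ 0 ≤ f) →
      ((List.range' k (clean.length - k)).foldl
        (fun (s : List (Nat × Nat) × Int × Nat) i =>
          let x := clean.getD i 0
          if x = -1 then s
          else if s.2.1 = -2 then (s.1, x, i)
          else if s.2.1 + x = 10 then (s.1 ++ [(s.2.2, i)], x, i)
          else (s.1, x, i)) (acc, f, p)).1 =
      acc ++ pairsRec k (if f = -2 then none else some (f, p)) l := by
  intro l
  induction l with
  | nil =>
    intro k acc f p hd _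
    have : clean.length ≤ k := List.drop_eq_nil_iff.mp hd
    rw [Nat.sub_eq_zero_of_le this]
    simp [pairsRec]
  | cons x t ih =>
    intro k acc f p hd hf
    obtain ⟨hk, hget, hd'⟩ := drop_cons_facts hd
    have hmem : x ∈ clean := List.mem_of_mem_drop (hd ▸ List.mem_cons_self ..)
    have hlen : clean.length - k = (clean.length - (k+1)) + 1 := by omega
    rw [hlen, List.range'_succ, List.foldl_cons]
    simp only [hget]
    by_cases h1 : x = -1
    · rw [if_pos h1, ih (k+1) acc f p hd' hf, pairsRec_cons_neg _ _ _ _ h1]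
    · rw [if_neg h1]
      have hx0 : 0 ≤ x := (hcl x hmem).resolve_left h1
      by_cases h2 : f = -2
      · rw [if_pos h2, ih (k+1) acc x k hd' (Or.inr hx0), if_pos h2,
          if_neg (by omega : ¬ x = -2), pairsRec_cons_none _ _ _ h1]
      · rw [if_neg h2, if_neg h2]
        by_cases h3 : f + x = 10
        · rw [if_pos h3, ih (k+1) (acc ++ [(p, k)]) x k hd' (Or.inr hx0),
            if_neg (by omega : ¬ x = -2), pairsRec_cons_some _ _ _ _ _ h1, if_pos h3]
          simp
        · rw [if_neg h3, ih (k+1) acc x k hd' (Or.inr hx0), if_neg (by omega : ¬ x = -2),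
            pairsRec_cons_some _ _ _ _ _ h1, if_neg h3]

lemma pairsRec_between (clean : List Int) :
    ∀ (l : List Int) (k : Nat) (st : Option (Int × Nat)),
      clean.drop k = l →
      (∀ f p, st = some (f, p) → p < k ∧ ∀ j, p < j → j < k → clean.getD j 0 = -1) →
      ∀ pq ∈ pairsRec k st l,
        pq.1 < pq.2 ∧ ∀ j, pq.1 < j → j < pq.2 → clean.getD j 0 = -1 := by
  intro l
  induction l with
  | nil => intro k st _ _ pq hpq; simp [pairsRec] at hpq
  | cons x t ih =>
    intro k st hd hinv pq hpq
    obtain ⟨hk, hget, hd'⟩ := drop_cons_facts hd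
    by_cases h1 : x = -1
    · rw [pairsRec_cons_neg _ _ _ _ h1] at hpq
      refine ih (k+1) st hd' ?_ pq hpq
      intro f p hst
      obtain ⟨hp, hb⟩ := hinv f p hst
      exact ⟨by omega, fun j hj1 hj2 => by
        rcases Nat.lt_or_ge j k with hj | hj
        · exact hb j hj1 hj
        · have : j = k := by omega
          subst this; rw [hget, h1]⟩
    · cases st with
      | none =>
        rw [pairsRec_cons_none _ _ _ h1] at hpq
        refine ih (k+1) _ hd' ?_ pq hpq
        intro f p hst
        injection hst with hst
        obtain ⟨rfl, rfl⟩ := Prod.mk.injEq .. ▸ (Prod.ext_iff.mp hst)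
        exact ⟨by omega, fun j hj1 hj2 => by omega⟩
      | some fp =>
        obtain ⟨f, p⟩ := fp
        rw [pairsRec_cons_some _ _ _ _ _ h1] at hpq
        have hnew : ∀ f' p', some ((x : Int), k) = some (f', p') →
            p' < k + 1 ∧ ∀ j, p' < j → j < k + 1 → clean.getD j 0 = -1 := by
          intro f' p' hst
          injection hst with hst
          obtain ⟨rfl, rfl⟩ := Prod.mk.injEq .. ▸ (Prod.ext_iff.mp hst)
          exact ⟨by omega, fun j hj1 hj2 => by omega⟩
        by_cases h3 : f + x = 10
        · rw [if_pos h3] at hpq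
          rcases List.mem_cons.mp hpq with rfl | hm
          · obtain ⟨hp, hb⟩ := hinv f p rfl
            exact ⟨hp, fun j hj1 hj2 => hb j hj1 hj2⟩
          · exact ih (k+1) _ hd' hnew pq hm
        · rw [if_neg h3] at hpq
          exact ih (k+1) _ hd' hnew pq hpq

lemma wwGo'_some :
    ∀ (l : List Int) (k p : Nat) (f : Int) (found : Bool), p < k →
      wwGo' l (some f) (k - p - 1) found =
        ((found || !(pairsRec k (some (f, p)) l).isEmpty) && (pairsRec k (some (f, p)) l).all okP) := by
  intro l
  induction l with
  | nil => intro k p f found _; simp [wwGo', pairsRec]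
  | cons x t ih =>
    intro k p f found hpk
    by_cases h1 : x = -1
    · rw [wwGo'_cons_neg _ _ _ _ _ h1, pairsRec_cons_neg _ _ _ _ h1]
      have he : k - p - 1 + 1 = (k + 1) - p - 1 := by omega
      rw [he]
      exact ih (k+1) p f found (by omega)
    · rw [wwGo'_cons_some _ _ _ _ _ h1, pairsRec_cons_some _ _ _ _ _ h1]
      by_cases h3 : f + x = 10
      · rw [if_pos h3, if_pos h3]
        by_cases h4 : k - p - 1 = 3
        · rw [if_neg (by omega : ¬ (k - p - 1 ≠ 3))]
          have h0 : (0 : Nat) = (k + 1) - k - 1 := by omega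
          rw [h0, ih (k+1) k x true (by omega)]
          simp [okP, h4]
        · rw [if_pos h4]
          simp only [List.all_cons, okP]
          have hb : ((k - p - 1 == 3) : Bool) = false := by simp [h4]
          simp [hb]
      · rw [if_neg h3, if_neg h3]
        have h0 : (0 : Nat) = (k + 1) - k - 1 := by omega
        rw [h0, ih (k+1) k x found (by omega)]

lemma wwGo'_none :
    ∀ (l : List Int) (k : Nat) (eq : Nat) (found : Bool),
      wwGo' l none eq found =
        ((found || !(pairsRec k none l).isEmpty) && (pairsRec k none l).all okP) := by
  intro l
  induction l with
  | nil => intro k eq found; simp [wwGo', pairsRec]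
  | cons x t ih =>
    intro k eq found
    by_cases h1 : x = -1
    · rw [wwGo'_cons_neg _ _ _ _ _ h1, pairsRec_cons_neg _ _ _ _ h1]
      exact ih (k+1) (eq+1) found
    · rw [wwGo'_cons_none _ _ _ _ h1, pairsRec_cons_none _ _ _ h1]
      have h0 : (0 : Nat) = (k + 1) - k - 1 := by omega
      rw [h0, wwGo'_some t (k+1) k x found (by omega)]

-- ===== VERDICT (by name: the statement is the Claim_ definition above) =====
lemma all_congr_mem {α : Type} (l : List α) (p q : α → Bool)
    (h : ∀ x ∈ l, p x = q x) : l.all p = l.all q := by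
  induction l with
  | nil => rfl
  | cons x t ih =>
    simp only [List.all_cons, h x (List.mem_cons_self ..),
      ih (fun y hy => h y (List.mem_cons_of_mem _ hy))]

theorem white_walkers_spec : Claim_equal_white_walkers := by
  intro village _
  unfold Spec_white_walkers white_walkers white_walkers_alt
  rw [wwGo_eq_wwGo']
  dsimp only
  rw [clean_eq_cleanOf, List.nil_append]
  by_cases hv : village.toList.length = 0
  · rw [if_pos hv]
    have : village.toList = [] := List.length_eq_zero_iff.mp hv
    rw [this]
    rfl
  · rw [if_neg hv]
    have hcl : ∀ x ∈ cleanOf village.toList, x = -1 ∨ 0 ≤ x := fun x hx => mem_cleanOf hx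
    have hpairs := fold_range_pairs (cleanOf village.toList) hcl (cleanOf village.toList)
      0 [] (-2) 0 (by simp) (Or.inl rfl)
    rw [if_pos rfl, List.nil_append, Nat.sub_zero, ← List.range_eq_range'] at hpairs
    rw [hpairs]
    have hmain := wwGo'_none (cleanOf village.toList) 0 0 false
    rw [hmain, Bool.false_or]
    have hgeom := pairsRec_between (cleanOf village.toList) (cleanOf village.toList) 0 none
      (by simp) (fun f p h => by simp at h)
    rw [all_congr_mem _ _ okP (fun pq hpq => by
      obtain ⟨hlt, hbet⟩ := hgeom pq hpq
      have hcnt := count_all_neg (cleanOf village.toList) (pq.2 - (pq.1 + 1)) (pq.1 + 1) 0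
        (fun j hj1 hj2 => hbet j (by omega) (by omega))
      rw [hcnt]
      unfold okP
      have : pq.2 - (pq.1 + 1) = pq.2 - pq.1 - 1 := by omega
      rw [Nat.zero_add, this])]
    cases hpr : pairsRec 0 none (cleanOf village.toList) with
    | nil => simp
    | cons a b =>
      rw [if_neg (by simp)]
      simp
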